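-- pv_equiv track=rewrite | github.com/basusaptarshi89/data_structure_with_python | leetcode/search_natural_wells.py | search_all_natural_wells
-- ===== SOURCE A (Python) =====
-- def search_natural_well_from_position(start_pos, A):
-- 	"""Returns a tuple of two index positions bordering a natural well with left bound as start_pos
-- 	   E.g.
-- 	   A = [0, 1, 0, 2, 1, 1, 0, 4, 4, 2, 0]
--
-- 	   search_natural_well_from_position(0, A) --> (1, 3)
-- 	   search_natural_well_from_position(3, A) --> (3, 7)
--
-- 	   If no natural_well is found, it returns (start_pos, None), E.g.
-- 	   search_natural_well_from_position(7, A) --> (7, None)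
-- 	"""
--
-- 	natural_well_end = None
--
-- 	went_down = False
-- 	went_up = False
--
-- 	high = start_pos + 1
-- 	while high < len(A):
-- 		if A[high] < A[start_pos]:
-- 			if not went_down:
-- 				went_down = True
-- 		elif went_down and (A[high] >= A[start_pos]):
-- 			went_up = True
--
-- 		if went_down and went_up:
-- 			natural_well_end = high
-- 			break
-- 		else:
-- 			high += 1
-- 	return (start_pos, natural_well_end)
--
-- def search_all_natural_wells(A):
-- 	"""Returns a list of tuples, where each tuple represents the left and right bound of a well.
-- 	   E.g.
-- 	   A = [0, 1, 0, 2, 1, 1, 0, 4, 4, 2, 0]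
-- 	   search_all_natural_wells(A) --> [(1,3), (3,7)]
-- 	"""
-- 	start_pos = 0
-- 	natural_wells = []
-- 	while start_pos < len(A):
-- 		natural_well_coordinates = search_natural_well_from_position(start_pos, A)
-- 		if natural_well_coordinates[1]:
-- 			natural_wells.append(natural_well_coordinates)
-- 			start_pos = natural_well_coordinates[1]
-- 		else:
-- 			start_pos +=1
-- 	return natural_wells
-- ===== SOURCE B (Python) =====
-- def search_all_natural_wells(A):
--     """O(n) re-implementation: next-smaller-to-the-right via a monotonic stack,
--     suffix maxima to reject dead starts in O(1), and a guided scan for the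
--     recovery index (successive success scans are disjoint)."""
--     n = len(A)
--     # ns[i] = first index j > i with A[j] < A[i], else None  (monotonic stack, right-to-left)
--     ns = [None] * n
--     stack = []
--     for i in range(n - 1, -1, -1):
--         while stack and A[stack[-1]] >= A[i]:
--             stack.pop()
--         ns[i] = stack[-1] if stack else None
--         stack.append(i)
--     # suffmax[i] = max(A[i:])
--     suffmax = [0] * n
--     m = None
--     for i in range(n - 1, -1, -1):
--         m = A[i] if m is None or A[i] > m else m
--         suffmax[i] = m
--     res = []
--     s = 0
--     while s < n:
--         d = ns[s]
--         e = None
--         if d is not None and d + 1 < n and suffmax[d + 1] >= A[s]: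
--             e = next((j for j in range(d + 1, n) if A[j] >= A[s]), None)
--         if e is not None:
--             res.append((s, e))
--             s = e
--         else:
--             s += 1
--     return res
-- ===== Notes on version B (the rewrite author's own statement) =====
-- stated objective: faster
-- what changed: Replaces A's restart-and-rescan nested loops by a linear algorithm: next-smaller-to-the-right indices are precomputed once with a monotonic stack, a suffix-maximum array rejects starts with no recovery in O(1), and the recovery index is found by a guided scan whose successive success ranges are disjoint.
import Mathlib
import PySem

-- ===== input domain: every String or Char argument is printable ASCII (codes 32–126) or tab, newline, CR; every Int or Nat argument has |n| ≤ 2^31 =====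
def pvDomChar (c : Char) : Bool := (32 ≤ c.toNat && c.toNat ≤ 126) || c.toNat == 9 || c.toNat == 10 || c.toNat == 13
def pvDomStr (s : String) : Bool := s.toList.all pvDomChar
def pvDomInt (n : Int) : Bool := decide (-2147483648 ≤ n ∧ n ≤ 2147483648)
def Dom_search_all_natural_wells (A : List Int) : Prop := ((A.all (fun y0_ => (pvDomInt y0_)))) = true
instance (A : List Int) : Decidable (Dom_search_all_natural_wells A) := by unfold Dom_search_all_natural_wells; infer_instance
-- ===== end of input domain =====

-- B replaces A's quadratic restart-and-rescan loops by a linear algorithm (monotonic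
-- stack for next-smaller indices + suffix maxima + guided scan); return values are equal.

-- ===== PORT A =====
-- inner while-loop of search_natural_well_from_position; fuel = |A| is enough since
-- high starts at start_pos+1 ≥ 1 at every call site and increases by 1 per iteration.
def pvSnwLoop (A : List Int) (start_pos : Int) : Nat → Int → Bool → Bool → Option Int
  | 0, _, _, _ => none
  | fuel+1, high, went_down, went_up =>
    if high < (A.length : Int) then
      -- A[high] / A[start_pos]: always in range at call sites (0 ≤ start_pos < high < len A)
      let vh := PySem.List.pyGetD A high 0
      let vs := PySem.List.pyGetD A start_pos 0
      let wd := if vh < vs then true else went_down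
      let wu := if (!decide (vh < vs)) && went_down && decide (vs ≤ vh) then true else went_up
      if wd && wu then some high
      else pvSnwLoop A start_pos fuel (high+1) wd wu
    else none

def search_natural_well_from_position (start_pos : Int) (A : List Int) : Int × Option Int :=
  (start_pos, pvSnwLoop A start_pos A.length (start_pos+1) false false)

-- outer while-loop; fuel = |A|+1 is enough: start_pos strictly increases each iteration.
def pvSawLoop (A : List Int) : Nat → Int → List (Int × Int) → List (Int × Int)
  | 0, _, natural_wells => natural_wells.reverse
  | fuel+1, start_pos, natural_wells =>
    if start_pos < (A.length : Int) then
      let c := search_natural_well_from_position start_pos A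
      match c.2 with
      | some e =>
        -- `if natural_well_coordinates[1]:` — Python truthiness: None and 0 are falsy
        if e == 0 then pvSawLoop A fuel (start_pos+1) natural_wells
        else pvSawLoop A fuel e ((c.1, e) :: natural_wells)
      | none => pvSawLoop A fuel (start_pos+1) natural_wells
    else natural_wells.reverse

def search_all_natural_wells (A : List Int) : List (Int × Int) :=
  pvSawLoop A (A.length + 1) 0 []

-- ===== PORT B =====
-- monotonic stack, right-to-left (stack kept top-first; Python keeps the top at the
-- end of its list, so pop-while = dropWhile, stack[-1] = head?, append = cons);
-- the accumulator collects ns[i] for i = counter-1, …, n-1 in index order.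
def pvNsAux (A : List Int) : Nat → List Int → List (Option Int) → List (Option Int)
  | 0, _, acc => acc
  | i+1, stack, acc =>
    let stack' := stack.dropWhile
      (fun j => decide (PySem.List.pyGetD A (i : Int) 0 ≤ PySem.List.pyGetD A j 0))
    pvNsAux A i ((i : Int) :: stack') (stack'.head? :: acc)

-- ns[i] = first index j > i with A[j] < A[i], else None
def pvNs (A : List Int) : List (Option Int) := pvNsAux A A.length [] []

-- suffmax[i] = max(A[i:]), built right-to-left exactly as the Python accumulation
def pvSuffmax : List Int → List Int
  | [] => []
  | a :: rest =>
    match pvSuffmax rest with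
    | [] => [a]
    | m :: tl => (if m < a then a else m) :: m :: tl

-- outer while-loop of B; fuel = |A|+1 is enough: s strictly increases each iteration.
def pvAltLoop (A : List Int) (ns : List (Option Int)) (sm : List Int) :
    Nat → Int → List (Int × Int) → List (Int × Int)
  | 0, _, res => res.reverse
  | fuel+1, s, res =>
    if s < (A.length : Int) then
      let e : Option Int :=
        match PySem.List.pyGetD ns s none with
        | some d =>
          if decide (d + 1 < (A.length : Int)) &&
             decide (PySem.List.pyGetD A s 0 ≤ PySem.List.pyGetD sm (d+1) 0) then
            (PySem.List.pyRange (d+1) (A.length : Int) 1).find?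
              (fun j => decide (PySem.List.pyGetD A s 0 ≤ PySem.List.pyGetD A j 0))
          else none
        | none => none
      match e with
      | some e' => pvAltLoop A ns sm fuel e' ((s, e') :: res)
      | none => pvAltLoop A ns sm fuel (s+1) res
    else res.reverse

def search_all_natural_wells_alt (A : List Int) : List (Int × Int) :=
  pvAltLoop A (pvNs A) (pvSuffmax A) (A.length + 1) 0 []

-- ===== PRECONDITION & SPEC =====
def Spec_search_all_natural_wells (A : List Int) (out : List (Int × Int)) : Prop := out = search_all_natural_wells_alt A
instance (A : List Int) (out : List (Int × Int)) : Decidable (Spec_search_all_natural_wells A out) := by unfold Spec_search_all_natural_wells; infer_instance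

-- ===== CLAIM (what is proved, stated in full; the proofs are below) =====
def Claim_equal_search_all_natural_wells : Prop := ∀ (A : List Int), Dom_search_all_natural_wells A → Spec_search_all_natural_wells A (search_all_natural_wells A)

-- ===== LEMMAS AND PROOFS =====

-- The common functional description both loops are reduced to:
-- pvDip A s = first index j > s with A[j] < A[s];  pvRec A s d = first j > d with A[j] ≥ A[s].
def pvDip (A : List Int) (s : Int) : Option Int :=
  (PySem.List.pyRange (s+1) (A.length : Int) 1).find?
    (fun j => decide (PySem.List.pyGetD A j 0 < PySem.List.pyGetD A s 0))

def pvRec (A : List Int) (s d : Int) : Option Int :=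
  (PySem.List.pyRange (d+1) (A.length : Int) 1).find?
    (fun j => decide (PySem.List.pyGetD A s 0 ≤ PySem.List.pyGetD A j 0))

def pvWell (A : List Int) (s : Int) : Option Int := (pvDip A s).bind (pvRec A s)

-- the stack contents after processing indices ≥ i, in closed form
def pvSpecStack (A : List Int) (i : Int) : List Int :=
  (PySem.List.pyRange i (A.length : Int) 1).filter
    (fun j => (PySem.List.pyRange i j 1).all
      (fun m => decide (PySem.List.pyGetD A j 0 < PySem.List.pyGetD A m 0)))

-- ---- generic list lemmas ----
lemma pv_filter_eq_dropWhile {α : Type} (p : α → Bool) :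
    ∀ (l : List α), l.Pairwise (fun a b => p a = true → p b = true) →
      l.filter p = l.dropWhile (fun a => !p a) := by
  intro l hl
  induction l with
  | nil => rfl
  | cons a t ih =>
    rcases List.pairwise_cons.mp hl with ⟨ha, ht⟩
    by_cases hp : p a = true
    · rw [List.filter_cons_of_pos hp, List.dropWhile_cons_of_neg (by simp [hp])]
      rw [List.filter_eq_self.mpr (fun b hb => ha b hb hp)]
    · rw [List.filter_cons_of_neg hp, List.dropWhile_cons_of_pos (by simp [hp]), ih ht]

lemma pv_find?_sorted_min {α : Type} [LinearOrder α] (p : α → Bool) :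
    ∀ (l : List α), l.Pairwise (· < ·) → ∀ x, l.find? p = some x →
      ∀ y ∈ l, y < x → p y = false := by
  intro l
  induction l with
  | nil => intro _ x hx; simp at hx
  | cons a t ih =>
    intro hl x hfind y hy hyx
    rcases List.pairwise_cons.mp hl with ⟨ha, ht⟩
    by_cases hp : p a = true
    · rw [List.find?_cons_of_pos hp] at hfind
      cases hfind
      rcases List.mem_cons.mp hy with rfl | hyt
      · exact absurd hyx (lt_irrefl _)
      · exact absurd hyx (not_lt.mpr (le_of_lt (ha y hyt)))
    · rw [List.find?_cons_of_neg hp] at hfind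
      rcases List.mem_cons.mp hy with rfl | hyt
      · exact Bool.eq_false_iff.mpr hp
      · exact ih ht x hfind y hyt hyx

lemma pv_find?_sorted_eq_some {α : Type} [LinearOrder α] (p : α → Bool) :
    ∀ (l : List α), l.Pairwise (· < ·) → ∀ x, x ∈ l → p x = true →
      (∀ y ∈ l, y < x → p y = false) → l.find? p = some x := by
  intro l
  induction l with
  | nil => intro _ x hx; simp at hx
  | cons a t ih =>
    intro hl x hx hpx hmin
    rcases List.pairwise_cons.mp hl with ⟨ha, ht⟩
    rcases List.mem_cons.mp hx with rfl | hxt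
    · exact List.find?_cons_of_pos hpx
    · have hax : a < x := ha x hxt
      have hpa : p a = false := hmin a (List.mem_cons_self) hax
      rw [List.find?_cons_of_neg (by simp [hpa])]
      exact ih ht x hxt hpx (fun y hy hyx => hmin y (List.mem_cons_of_mem _ hy) hyx)

-- ---- stack lemmas ----
lemma pvSpecStack_pairwise (A : List Int) (i : Int) :
    (pvSpecStack A i).Pairwise
      (fun a b => a < b ∧ PySem.List.pyGetD A b 0 < PySem.List.pyGetD A a 0) := by
  have h1 : (PySem.List.pyRange i (A.length : Int) 1).Pairwise (· < ·) :=
    PySem.List.pairwise_lt_pyRange_one i (A.length : Int)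
  have h2 := h1.filter
    (p := fun j => (PySem.List.pyRange i j 1).all
      (fun m => decide (PySem.List.pyGetD A j 0 < PySem.List.pyGetD A m 0)))
  refine List.Pairwise.imp_of_mem ?_ h2
  intro a b ha hb hab
  refine ⟨hab, ?_⟩
  have hcb := List.of_mem_filter hb
  have hamem : a ∈ PySem.List.pyRange i b 1 := by
    have := (PySem.List.mem_pyRange_one).mp (List.mem_of_mem_filter ha)
    exact (PySem.List.mem_pyRange_one).mpr ⟨this.1, hab⟩
  have := (List.all_eq_true.mp hcb) a hamem
  exact of_decide_eq_true this

lemma pvSpecStack_head (A : List Int) (i : Int) :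
    ((pvSpecStack A (i+1)).dropWhile
      (fun j => decide (PySem.List.pyGetD A i 0 ≤ PySem.List.pyGetD A j 0))).head? =
    pvDip A i := by
  have hpred : (fun a => !decide (PySem.List.pyGetD A a 0 < PySem.List.pyGetD A i 0))
      = (fun j => decide (PySem.List.pyGetD A i 0 ≤ PySem.List.pyGetD A j 0)) := by
    funext a; rw [← decide_not]; exact decide_eq_decide.mpr not_lt
  have hpw : (pvSpecStack A (i+1)).Pairwise
      (fun a b => decide (PySem.List.pyGetD A a 0 < PySem.List.pyGetD A i 0) = true →
        decide (PySem.List.pyGetD A b 0 < PySem.List.pyGetD A i 0) = true) := by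
    refine (pvSpecStack_pairwise A (i+1)).imp ?_
    intro a b hab hc
    exact decide_eq_true (lt_trans hab.2 (of_decide_eq_true hc))
  rw [← hpred, ← pv_filter_eq_dropWhile _ _ hpw, List.head?_filter]
  have hsorted : (pvSpecStack A (i+1)).Pairwise (· < ·) :=
    (pvSpecStack_pairwise A (i+1)).imp (fun h => h.1)
  rcases hD : pvDip A i with _ | d
  · unfold pvDip at hD
    refine List.find?_eq_none.mpr ?_
    intro x hx
    exact List.find?_eq_none.mp hD x (List.mem_of_mem_filter hx)
  · unfold pvDip at hD
    have hd1 : decide (PySem.List.pyGetD A d 0 < PySem.List.pyGetD A i 0) = true := by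
      have := List.find?_some hD; simpa using this
    have hd2 : d ∈ PySem.List.pyRange (i+1) (A.length : Int) 1 :=
      List.mem_of_find?_eq_some hD
    have hmin := pv_find?_sorted_min _ _
      (PySem.List.pairwise_lt_pyRange_one (i+1) (A.length : Int)) d hD
    have hdb := (PySem.List.mem_pyRange_one).mp hd2
    have hcond : ((PySem.List.pyRange (i+1) d 1).all
        (fun m => decide (PySem.List.pyGetD A d 0 < PySem.List.pyGetD A m 0))) = true := by
      refine List.all_eq_true.mpr ?_
      intro m hm
      have hmb := (PySem.List.mem_pyRange_one).mp hm
      have hmem : m ∈ PySem.List.pyRange (i+1) (A.length : Int) 1 :=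
        (PySem.List.mem_pyRange_one).mpr ⟨hmb.1, by omega⟩
      have hmf := hmin m hmem hmb.2
      have : PySem.List.pyGetD A i 0 ≤ PySem.List.pyGetD A m 0 := by
        by_contra hcn
        rw [decide_eq_true (not_le.mp hcn)] at hmf
        exact Bool.true_eq_false.mp hmf
      exact decide_eq_true (lt_of_lt_of_le (of_decide_eq_true hd1) this)
    refine pv_find?_sorted_eq_some _ _ hsorted d ?_ hd1 ?_
    · exact List.mem_filter.mpr ⟨hd2, hcond⟩
    · intro y hy hyd
      exact hmin y (List.mem_of_mem_filter hy) hyd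

lemma pvSpecStack_step (A : List Int) (i : Int) (hn : i < (A.length : Int)) :
    pvSpecStack A i = i :: (pvSpecStack A (i+1)).dropWhile
      (fun j => decide (PySem.List.pyGetD A i 0 ≤ PySem.List.pyGetD A j 0)) := by
  unfold pvSpecStack
  rw [PySem.List.pyRange_one_cons hn,
    List.filter_cons_of_pos (by simp [PySem.List.pyRange_one_eq_nil (le_refl i)])]
  congr 1
  have hstep : ∀ j ∈ PySem.List.pyRange (i+1) (A.length : Int) 1,
      ((PySem.List.pyRange i j 1).all
        (fun m => decide (PySem.List.pyGetD A j 0 < PySem.List.pyGetD A m 0)))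
      = (decide (PySem.List.pyGetD A j 0 < PySem.List.pyGetD A i 0) &&
         (PySem.List.pyRange (i+1) j 1).all
           (fun m => decide (PySem.List.pyGetD A j 0 < PySem.List.pyGetD A m 0))) := by
    intro j hj
    have hij : i + 1 ≤ j := ((PySem.List.mem_pyRange_one).mp hj).1
    rw [PySem.List.pyRange_one_cons (by omega), List.all_cons]
  rw [List.filter_congr hstep]
  have hff : (PySem.List.pyRange (i+1) (A.length : Int) 1).filter
      (fun j => decide (PySem.List.pyGetD A j 0 < PySem.List.pyGetD A i 0) &&
        (PySem.List.pyRange (i+1) j 1).all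
          (fun m => decide (PySem.List.pyGetD A j 0 < PySem.List.pyGetD A m 0)))
      = (pvSpecStack A (i+1)).filter
          (fun j => decide (PySem.List.pyGetD A j 0 < PySem.List.pyGetD A i 0)) := by
    rw [pvSpecStack, List.filter_filter]
  rw [hff, pv_filter_eq_dropWhile _ _ ?pw]
  case pw =>
    refine (pvSpecStack_pairwise A (i+1)).imp ?_
    intro a b hab hc
    exact decide_eq_true (lt_trans hab.2 (of_decide_eq_true hc))
  have hpred : (fun a => !decide (PySem.List.pyGetD A a 0 < PySem.List.pyGetD A i 0))
      = (fun j => decide (PySem.List.pyGetD A i 0 ≤ PySem.List.pyGetD A j 0)) := by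
    funext a; rw [← decide_not]; exact decide_eq_decide.mpr not_lt
  rw [hpred, pvSpecStack]

lemma pvNs_eq_map (A : List Int) :
    pvNs A = (PySem.List.pyRange 0 (A.length : Int) 1).map (fun i => pvDip A i) := by
  have inv : ∀ (i : Nat), (i : Int) ≤ (A.length : Int) →
      pvNsAux A i (pvSpecStack A (i : Int))
        ((PySem.List.pyRange (i : Int) (A.length : Int) 1).map (fun k => pvDip A k)) =
      (PySem.List.pyRange 0 (A.length : Int) 1).map (fun k => pvDip A k) := by
    intro i
    induction i with
    | zero => intro _; rw [pvNsAux]; norm_num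
    | succ i ih =>
      intro hle
      have hn : (i : Int) < (A.length : Int) := by push_cast at hle; omega
      rw [pvNsAux]
      have hcast : ((i+1 : Nat) : Int) = (i : Int) + 1 := by push_cast; ring
      rw [hcast]
      rw [← pvSpecStack_step A (i : Int) hn, pvSpecStack_head A (i : Int)]
      rw [← List.map_cons, ← PySem.List.pyRange_one_cons hn]
      exact ih (le_of_lt hn)
  have h := inv A.length le_rfl
  unfold pvNs
  rw [← h]
  congr 1
  · unfold pvSpecStack
    rw [PySem.List.pyRange_one_eq_nil le_rfl]
    rfl
  · rw [PySem.List.pyRange_one_eq_nil le_rfl]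
    rfl

-- ---- suffix maximum lemmas ----
lemma pvSuffmax_length (A : List Int) : (pvSuffmax A).length = A.length := by
  induction A with
  | nil => rfl
  | cons a rest ih =>
    rw [pvSuffmax]
    cases h : pvSuffmax rest with
    | nil => rw [h] at ih; simpa using ih.symm
    | cons m tl => rw [h] at ih; simpa using ih

lemma pvSuffmax_ge (A : List Int) :
    ∀ (k j : Nat), k ≤ j → (hj : j < A.length) → (hk : k < (pvSuffmax A).length) →
      A[j] ≤ (pvSuffmax A)[k] := by
  induction A with
  | nil => intro k j _ hj _; simp at hj
  | cons a rest ih =>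
    intro k j hkj hj hk
    cases h : pvSuffmax rest with
    | nil =>
      have hr : rest = [] := by
        have := pvSuffmax_length rest
        rw [h] at this
        exact List.length_eq_zero_iff.mp this.symm
      subst hr
      have hj0 : j = 0 := by simp at hj; omega
      have hk0 : k = 0 := by omega
      subst hj0; subst hk0
      simp [pvSuffmax]
    | cons m tl =>
      have hgoal : pvSuffmax (a :: rest) = (if m < a then a else m) :: m :: tl := by
        rw [pvSuffmax, h]
      simp only [hgoal] at hk ⊢
      cases k with
      | zero =>
        cases j with
        | zero =>
          simp only [List.getElem_cons_zero]
          split <;> omega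
        | succ j' =>
          have hj' : j' < rest.length := by simpa using hj
          have hk' : 0 < (pvSuffmax rest).length := by rw [h]; simp
          have hih := ih 0 j' (Nat.zero_le _) hj' hk'
          simp only [h] at hih
          simp only [List.getElem_cons_succ, List.getElem_cons_zero] at hih ⊢
          calc rest[j'] ≤ m := hih
            _ ≤ _ := by split <;> omega
      | succ k' =>
        cases j with
        | zero => omega
        | succ j' =>
          have hj' : j' < rest.length := by simpa using hj
          have hk' : k' < (pvSuffmax rest).length := by
            rw [h]; simpa using hk
          have hih := ih k' j' (by omega) hj' hk'
          simp only [h] at hih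
          cases k' with
          | zero => simpa using hih
          | succ k'' => simpa using hih

-- ---- A's inner loop computes pvWell ----
lemma pvSnwLoop_phase2 (A : List Int) (s : Int) :
    ∀ (fuel : Nat) (high : Int), (A.length : Int) ≤ high + fuel →
      pvSnwLoop A s fuel high true false =
        (PySem.List.pyRange high (A.length : Int) 1).find?
          (fun j => decide (PySem.List.pyGetD A s 0 ≤ PySem.List.pyGetD A j 0)) := by
  intro fuel
  induction fuel with
  | zero =>
    intro high hb
    rw [PySem.List.pyRange_one_eq_nil (by push_cast at hb ⊢; omega)]
    rfl
  | succ fuel ih =>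
    intro high hb
    by_cases hh : high < (A.length : Int)
    · rw [PySem.List.pyRange_one_cons hh, List.find?_cons, pvSnwLoop]
      by_cases hv : PySem.List.pyGetD A high 0 < PySem.List.pyGetD A s 0
      · have hns : ¬ (PySem.List.pyGetD A s 0 ≤ PySem.List.pyGetD A high 0) := not_le.mpr hv
        simp only [if_pos hh, if_pos hv, decide_eq_true hv, hns, decide_false,
          Bool.not_true, Bool.and_true, Bool.and_false, Bool.false_eq_true, ite_false]
        exact ih (high+1) (by push_cast at hb ⊢; omega)
      · have hle : PySem.List.pyGetD A s 0 ≤ PySem.List.pyGetD A high 0 := not_lt.mp hv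
        simp [hh, hv, hle]
    · rw [pvSnwLoop, if_neg hh, PySem.List.pyRange_one_eq_nil (not_lt.mp hh)]
      rfl

lemma pvSnwLoop_phase1 (A : List Int) (s : Int) :
    ∀ (fuel : Nat) (high : Int), (A.length : Int) ≤ high + fuel →
      pvSnwLoop A s fuel high false false =
        ((PySem.List.pyRange high (A.length : Int) 1).find?
          (fun j => decide (PySem.List.pyGetD A j 0 < PySem.List.pyGetD A s 0))).bind
          (pvRec A s) := by
  intro fuel
  induction fuel with
  | zero =>
    intro high hb
    rw [PySem.List.pyRange_one_eq_nil (by push_cast at hb ⊢; omega)]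
    rfl
  | succ fuel ih =>
    intro high hb
    by_cases hh : high < (A.length : Int)
    · rw [PySem.List.pyRange_one_cons hh, List.find?_cons, pvSnwLoop]
      by_cases hv : PySem.List.pyGetD A high 0 < PySem.List.pyGetD A s 0
      · simp only [if_pos hh, if_pos hv, decide_eq_true hv, Bool.not_true, Bool.false_and,
          Bool.and_false, Bool.true_and]
        have h2 := pvSnwLoop_phase2 A s fuel (high+1) (by push_cast at hb ⊢; omega)
        simp only [Bool.false_eq_true, if_false]
        rw [h2]
        simp [pvRec]
      · have hle : PySem.List.pyGetD A s 0 ≤ PySem.List.pyGetD A high 0 := not_lt.mp hv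
        simp only [if_pos hh, if_neg hv, decide_eq_false hv, Bool.false_eq_true, ite_false,
          Bool.and_false, Bool.false_and, Bool.not_false]
        have := ih (high+1) (by push_cast at hb ⊢; omega)
        rw [this]
    · rw [pvSnwLoop, if_neg hh, PySem.List.pyRange_one_eq_nil (not_lt.mp hh)]
      rfl

lemma pvSnw_eq_well (A : List Int) (s : Int) (hs : 0 ≤ s) :
    pvSnwLoop A s A.length (s+1) false false = pvWell A s := by
  rw [pvSnwLoop_phase1 A s A.length (s+1) (by omega)]
  rfl

-- ---- bounds on pvWell's answer ----
lemma pvWell_bounds (A : List Int) (s e : Int) (h : pvWell A s = some e) :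
    s + 2 ≤ e ∧ e < (A.length : Int) := by
  unfold pvWell at h
  rcases hd : pvDip A s with _ | d
  · rw [hd] at h; simp at h
  · rw [hd] at h
    simp only [Option.bind_some] at h
    unfold pvDip at hd
    have hdm := (PySem.List.mem_pyRange_one).mp (List.mem_of_find?_eq_some hd)
    unfold pvRec at h
    have hem := (PySem.List.mem_pyRange_one).mp (List.mem_of_find?_eq_some h)
    omega

-- ---- B's per-step value is pvWell ----
lemma pvAlt_step (A : List Int) (s : Int) (hs : 0 ≤ s) (hn : s < (A.length : Int)) :
    (match PySem.List.pyGetD (pvNs A) s none with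
      | some d =>
        if decide (d + 1 < (A.length : Int)) &&
           decide (PySem.List.pyGetD A s 0 ≤ PySem.List.pyGetD (pvSuffmax A) (d+1) 0) then
          (PySem.List.pyRange (d+1) (A.length : Int) 1).find?
            (fun j => decide (PySem.List.pyGetD A s 0 ≤ PySem.List.pyGetD A j 0))
        else none
      | none => none) = pvWell A s := by
  rw [pvNs_eq_map, PySem.List.pyGetD_map_pyRange_of_nonneg _ _ _ _ hs hn]
  rcases hd : pvDip A s with _ | d
  · simp [pvWell, hd]
  · unfold pvDip at hd
    have hdm := (PySem.List.mem_pyRange_one).mp (List.mem_of_find?_eq_some hd)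
    simp only [pvWell, pvDip, hd, Option.bind_some]
    by_cases h1 : d + 1 < (A.length : Int)
    · by_cases h2 : PySem.List.pyGetD A s 0 ≤ PySem.List.pyGetD (pvSuffmax A) (d+1) 0
      · rw [if_pos (by simp [h1, h2])]
        rfl
      · rw [if_neg (by simp [h2])]
        symm
        unfold pvRec
        refine List.find?_eq_none.mpr ?_
        intro j hj
        have hjb := (PySem.List.mem_pyRange_one).mp hj
        simp only [decide_eq_true_eq, not_le]
        have hsmlen : (pvSuffmax A).length = A.length := pvSuffmax_length A
        have hA : PySem.List.pyGetD A j 0 = A[j.toNat]'(by omega) :=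
          PySem.List.pyGetD_eq_getElem A 0 (by omega) (by omega)
        have hsm : PySem.List.pyGetD (pvSuffmax A) (d+1) 0 =
            (pvSuffmax A)[(d+1).toNat]'(by omega) :=
          PySem.List.pyGetD_eq_getElem (pvSuffmax A) 0 (by omega) (by omega)
        have hge := pvSuffmax_ge A (d+1).toNat j.toNat (by omega) (by omega) (by omega)
        rw [hA]
        calc A[j.toNat]'(by omega) ≤ (pvSuffmax A)[(d+1).toNat]'(by omega) := hge
          _ = PySem.List.pyGetD (pvSuffmax A) (d+1) 0 := hsm.symm
          _ < PySem.List.pyGetD A s 0 := not_le.mp h2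
    · rw [if_neg (by simp [h1])]
      symm
      unfold pvRec
      rw [PySem.List.pyRange_one_eq_nil (by omega)]
      rfl

-- ---- the two outer loops agree step by step ----
lemma pvLoops_eq (A : List Int) :
    ∀ (fuel : Nat) (s : Int), 0 ≤ s → ∀ (res : List (Int × Int)),
      pvSawLoop A fuel s res = pvAltLoop A (pvNs A) (pvSuffmax A) fuel s res := by
  intro fuel
  induction fuel with
  | zero => intro s _ res; rfl
  | succ fuel ih =>
    intro s hs res
    by_cases hn : s < (A.length : Int)
    · rw [pvSawLoop, pvAltLoop, if_pos hn, if_pos hn]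
      have hstepA : (search_natural_well_from_position s A).2 = pvWell A s :=
        pvSnw_eq_well A s hs
      have hstepB := pvAlt_step A s hs hn
      rcases hw : pvWell A s with _ | e
      · rw [hw] at hstepA hstepB
        simp only [search_natural_well_from_position] at hstepA ⊢
        rw [hstepA, hstepB]
        exact ih (s+1) (by omega) res
      · rw [hw] at hstepA hstepB
        have hb := pvWell_bounds A s e hw
        have hne : (e == (0:Int)) = false := by simp; omega
        simp only [search_natural_well_from_position] at hstepA ⊢
        rw [hstepA, hstepB]
        simp only [hne, Bool.false_eq_true, if_false]
        exact ih e (by omega) ((s, e) :: res)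
    · rw [pvSawLoop, pvAltLoop, if_neg hn, if_neg hn]

-- ===== VERDICT (by name: the statement is the Claim_ definition above) =====
theorem search_all_natural_wells_spec : Claim_equal_search_all_natural_wells := by
  intro A _
  show search_all_natural_wells A = search_all_natural_wells_alt A
  unfold search_all_natural_wells search_all_natural_wells_alt
  exact pvLoops_eq A (A.length + 1) 0 le_rfl []
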